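-- pv_equiv track=rewrite | github.com/darae07/study | algorithm/book_icote/41.여행계획.py | solution
-- ===== SOURCE A (Python) =====
-- def find(parent, x):
--     if parent[x] != x:
--         parent[x] = find(parent, parent[x])
--     return parent[x]
--
-- def union(parent, a, b):
--     a = find(parent, a)
--     b = find(parent, b)
--     # 값이 큰 노드의 부모를 작은 노드로 설정
--     if a < b:
--         parent[b] = a
--     else:
--         parent[a] = b
--
-- def solution(graph, path):
--     n = len(graph)
--     m = len(path)
--     parent = [0]*(n+1)
--     # 부모를 자신으로 설정
--     for i in range(1, n+1):
--         parent[i] = i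
--
--     # 연결 존재하면 union연산 수행
--     for i in range(n):
--         for j in range(n):
--             if graph[i][j] == 1:
--                 union(parent, i+1, j+1)
--
--     result = True
--     # 다른 집합이면 여행 불가
--     for i in range(m-1):
--         if find(parent, path[i]) != find(parent, path[i+1]):
--             result = False
--     return result
-- ===== SOURCE B (Python) =====
-- def solution(graph, path):
--     # Component labels by eager merge-relabel (no union-find forest):
--     # comp[x] ends up the smallest node of x's connected component.
--     n = len(graph)
--     comp = list(range(n + 1))
--     for i in range(n):
--         for j in range(n):
--             if graph[i][j] == 1:
--                 a = comp[i + 1]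
--                 b = comp[j + 1]
--                 if a != b:
--                     lo, hi = (a, b) if a < b else (b, a)
--                     comp = [lo if c == hi else c for c in comp]
--     return all(comp[path[k]] == comp[path[k + 1]] for k in range(len(path) - 1))
-- ===== Notes on version B (the rewrite author's own statement) =====
-- stated objective: alternative
-- what changed: Replaces the union-find forest (recursive find with path compression plus union-by-smaller-root) by a flat component-label array merged eagerly: on each edge the larger of the two endpoint labels is globally relabelled to the smaller, and the path check compares labels directly.
import Mathlib
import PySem

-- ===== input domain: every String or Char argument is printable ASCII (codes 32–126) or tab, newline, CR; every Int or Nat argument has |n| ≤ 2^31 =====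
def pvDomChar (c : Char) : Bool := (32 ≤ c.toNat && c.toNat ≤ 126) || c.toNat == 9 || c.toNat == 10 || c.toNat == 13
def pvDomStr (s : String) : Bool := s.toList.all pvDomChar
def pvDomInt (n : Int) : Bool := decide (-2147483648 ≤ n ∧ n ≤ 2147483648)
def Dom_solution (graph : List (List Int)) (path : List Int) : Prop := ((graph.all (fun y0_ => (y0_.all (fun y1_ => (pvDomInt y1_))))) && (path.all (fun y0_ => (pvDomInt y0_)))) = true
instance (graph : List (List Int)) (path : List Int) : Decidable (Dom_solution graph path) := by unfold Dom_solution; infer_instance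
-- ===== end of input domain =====

-- B replaces A's union-find forest by an eagerly merged flat component-label array
-- (same return value; A's in-place mutation of no argument is observable, only locals).

-- ===== PORT A =====
-- find(parent, x): recursion with path compression; the recursion is fuelled, and
-- fuel = parent.length + 1 (used at every call site) suffices on every admitted input,
-- since chain indices strictly decrease, so the 0-fuel branch is never reached.
def findA : Nat → List Int → Int → List Int × Int
  | 0, parent, _ => (parent, 0)
  | fuel+1, parent, x =>
    let px := PySem.List.pyGetD parent x 0
    if px ≠ x then
      let pr := findA fuel parent px
      (PySem.List.pySetD pr.1 x pr.2, pr.2)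
    else (parent, px)

def unionA (parent : List Int) (a b : Int) : List Int :=
  let fa := findA (parent.length + 1) parent a
  let fb := findA (fa.1.length + 1) fa.1 b
  if fa.2 < fb.2 then PySem.List.pySetD fb.1 fb.2 fa.2
  else PySem.List.pySetD fb.1 fa.2 fb.2

-- body of A's edge double loop ('if graph[i][j] == 1: union(parent, i+1, j+1)')
def edgeA (graph : List (List Int)) (p : List Int) (i j : Int) : List Int :=
  if PySem.List.pyGetD (PySem.List.pyGetD graph i []) j 0 = 1 then unionA p (i+1) (j+1) else p

-- body of A's final loop (two finds on the current parent, result may be cleared)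
def stepFin (path : List Int) (st : List Int × Bool) (i : Int) : List Int × Bool :=
  let f1 := findA (st.1.length + 1) st.1 (PySem.List.pyGetD path i 0)
  let f2 := findA (f1.1.length + 1) f1.1 (PySem.List.pyGetD path (i+1) 0)
  (f2.1, if f1.2 ≠ f2.2 then false else st.2)

def solution (graph : List (List Int)) (path : List Int) : Bool :=
  let n : Int := PySem.List.len graph
  let m : Int := PySem.List.len path
  let parent0 : List Int := List.replicate (graph.length + 1) 0
  let parent1 := (PySem.List.pyRange 1 (n+1) 1).foldl (fun p i => PySem.List.pySetD p i i) parent0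
  let parent2 := (PySem.List.pyRange 0 n 1).foldl
      (fun p i => (PySem.List.pyRange 0 n 1).foldl (fun p j => edgeA graph p i j) p) parent1
  ((PySem.List.pyRange 0 (m-1) 1).foldl (stepFin path) (parent2, true)).2

-- ===== PORT B =====
-- body of B's edge double loop: eager merge of the two endpoint labels
def edgeB (graph : List (List Int)) (c : List Int) (i j : Int) : List Int :=
  if PySem.List.pyGetD (PySem.List.pyGetD graph i []) j 0 = 1 then
    let a := PySem.List.pyGetD c (i+1) 0
    let b := PySem.List.pyGetD c (j+1) 0
    if a ≠ b then
      let lo := if a < b then a else b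
      let hi := if a < b then b else a
      c.map (fun x => if x = hi then lo else x)
    else c
  else c

def solution_alt (graph : List (List Int)) (path : List Int) : Bool :=
  let n : Int := PySem.List.len graph
  let comp0 := PySem.List.pyRange 0 (n+1) 1
  let comp := (PySem.List.pyRange 0 n 1).foldl
      (fun c i => (PySem.List.pyRange 0 n 1).foldl (fun c j => edgeB graph c i j) c) comp0
  (PySem.List.pyRange 0 (PySem.List.len path - 1) 1).all (fun k =>
    decide (PySem.List.pyGetD comp (PySem.List.pyGetD path k 0) 0 =
            PySem.List.pyGetD comp (PySem.List.pyGetD path (k+1) 0) 0))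

-- ===== PRECONDITION & SPEC =====
-- Pre_ excludes exactly the inputs where A raises IndexError: a graph row shorter than
-- len(graph) (read by graph[i][j]), and, when the path loop runs (len(path) ≥ 2), a path
-- entry that is not a valid (possibly negative) index into the parent array of length n+1.
def Pre_solution (graph : List (List Int)) (path : List Int) : Prop :=
  (∀ row ∈ graph, graph.length ≤ row.length) ∧
  (2 ≤ path.length → ∀ p ∈ path, -((graph.length : Int) + 1) ≤ p ∧ p ≤ (graph.length : Int))
instance (graph : List (List Int)) (path : List Int) : Decidable (Pre_solution graph path) := by
  unfold Pre_solution; infer_instance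

def pvWitness_solution : List (List Int) × List Int := ([[0, 1], [1, 0]], [1, 2])

def Spec_solution (graph : List (List Int)) (path : List Int) (out : Bool) : Prop := out = solution_alt graph path
instance (graph : List (List Int)) (path : List Int) (out : Bool) : Decidable (Spec_solution graph path out) := by unfold Spec_solution; infer_instance

-- ===== CLAIM (what is proved, stated in full; the proofs are below) =====
def Claim_equal_solution : Prop := ∀ (graph : List (List Int)) (path : List Int), Dom_solution graph path → Pre_solution graph path → Spec_solution graph path (solution graph path)

-- ===== LEMMAS AND PROOFS =====

-- parent-array invariant: every entry is a nonnegative index no larger than its slot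
def PInv (parent : List Int) : Prop :=
  ∀ k, k < parent.length → 0 ≤ parent.getD k 0 ∧ parent.getD k 0 ≤ (k : Int)

-- pure (mutation-free) root of slot k in the parent forest
def rootN : Nat → List Int → Nat → Int
  | 0, _, _ => 0
  | f+1, parent, k =>
    let p := parent.getD k 0
    if p = (k : Int) then (k : Int) else rootN f parent p.toNat

def Root (parent : List Int) (k : Nat) : Int := rootN (k+1) parent k

-- Python's possibly-negative list index x normalised to a slot of a length-L list
def slot (L : Nat) (x : Int) : Nat := if 0 ≤ x then x.toNat else L - (-x).toNat

theorem slot_lt (L : Nat) (x : Int) (h1 : -(L : Int) ≤ x) (h2 : x < (L : Int)) :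
    slot L x < L := by
  unfold slot; split_ifs <;> omega

theorem pyGetD_slot (l : List Int) (x : Int) (d : Int)
    (h1 : -(l.length : Int) ≤ x) (h2 : x < (l.length : Int)) :
    PySem.List.pyGetD l x d = l.getD (slot l.length x) d := by
  have hs := slot_lt l.length x h1 h2
  by_cases h0 : 0 ≤ x
  · simp only [PySem.List.pyGetD, PySem.List.pyGet?, PySem.List.pyIdx?, slot, if_pos h0,
      if_pos h2]
    simp [List.getD, List.getElem?_eq_getElem (show x.toNat < l.length by omega)]
  · simp only [PySem.List.pyGetD, PySem.List.pyGet?, PySem.List.pyIdx?, slot, if_neg h0,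
      if_pos h1]
    simp [List.getD, List.getElem?_eq_getElem (show l.length - (-x).toNat < l.length by omega)]

theorem pySetD_slot (l : List Int) (x v : Int)
    (h1 : -(l.length : Int) ≤ x) (h2 : x < (l.length : Int)) :
    PySem.List.pySetD l x v = l.set (slot l.length x) v := by
  by_cases h0 : 0 ≤ x
  · simp only [PySem.List.pySetD, PySem.List.pySet?, PySem.List.pyIdx?, slot, if_pos h0,
      if_pos h2]
    simp
  · simp only [PySem.List.pySetD, PySem.List.pySet?, PySem.List.pyIdx?, slot, if_neg h0,
      if_pos h1]
    simp

theorem getD_set_self (l : List Int) (n : Nat) (v : Int) (h : n < l.length) :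
    (l.set n v).getD n 0 = v := by
  simp [List.getD, h]

theorem getD_set_ne (l : List Int) (n m : Nat) (v : Int) (h : m ≠ n) :
    (l.set n v).getD m 0 = l.getD m 0 := by
  simp [List.getD, List.getElem?_set_ne (Ne.symm h)]

theorem rootN_fuel (parent : List Int) (hinv : PInv parent) :
    ∀ k f g, k < parent.length → k+1 ≤ f → k+1 ≤ g →
      rootN f parent k = rootN g parent k := by
  intro k
  induction k using Nat.strong_induction_on with
  | _ k ih =>
    intro f g hk hf hg
    obtain ⟨f', rfl⟩ : ∃ f', f = f'+1 := ⟨f-1, by omega⟩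
    obtain ⟨g', rfl⟩ : ∃ g', g = g'+1 := ⟨g-1, by omega⟩
    simp only [rootN]
    by_cases hp : parent.getD k 0 = (k : Int)
    · rw [if_pos hp, if_pos hp]
    · have hb := hinv k hk
      have hlt : (parent.getD k 0).toNat < k := by omega
      simp only [if_neg hp]
      exact ih _ hlt _ _ (by omega) (by omega) (by omega)

theorem root_step (parent : List Int) (hinv : PInv parent) (k : Nat) (hk : k < parent.length) :
    Root parent k =
      if parent.getD k 0 = (k : Int) then (k : Int) else Root parent (parent.getD k 0).toNat := by
  show rootN (k+1) parent k = _
  simp only [rootN]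
  by_cases hp : parent.getD k 0 = (k : Int)
  · rw [if_pos hp, if_pos hp]
  · have hb := hinv k hk
    have hlt : (parent.getD k 0).toNat < k := by omega
    simp only [if_neg hp]
    exact rootN_fuel parent hinv _ _ _ (by omega) (by omega) (by omega)

theorem root_spec (parent : List Int) (hinv : PInv parent) :
    ∀ k, k < parent.length →
      0 ≤ Root parent k ∧ Root parent k ≤ (k : Int) ∧
      parent.getD (Root parent k).toNat 0 = Root parent k := by
  intro k
  induction k using Nat.strong_induction_on with
  | _ k ih =>
    intro hk
    rw [root_step parent hinv k hk]
    by_cases hp : parent.getD k 0 = (k : Int)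
    · rw [if_pos hp]
      exact ⟨by omega, le_refl _, by simpa using hp⟩
    · have hb := hinv k hk
      have hlt : (parent.getD k 0).toNat < k := by omega
      have h := ih _ hlt (by omega)
      simp only [if_neg hp]
      exact ⟨h.1, by omega, h.2.2⟩

-- a root slot is its own Root
theorem root_fix (parent : List Int) (hinv : PInv parent) (r : Int) (hr0 : 0 ≤ r)
    (hrlen : r.toNat < parent.length) (hfix : parent.getD r.toNat 0 = r) :
    Root parent r.toNat = r := by
  rw [root_step parent hinv _ hrlen,
    if_pos (hfix.trans (Int.toNat_of_nonneg hr0).symm)]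
  exact Int.toNat_of_nonneg hr0

-- merging: setting a root slot hi to a (smaller) root value lo relabels component hi to lo
theorem root_merge (parent : List Int) (hinv : PInv parent) (hi : Nat) (lo : Int)
    (hhi : hi < parent.length) (hrhi : parent.getD hi 0 = (hi : Int))
    (hlo0 : 0 ≤ lo) (hlohi : lo ≤ (hi : Int)) (hrlo : parent.getD lo.toNat 0 = lo) :
    PInv (parent.set hi lo) ∧
    ∀ k, k < parent.length →
      Root (parent.set hi lo) k = if Root parent k = (hi : Int) then lo else Root parent k := by
  have hRhi : Root parent hi = (hi : Int) := by
    rw [root_step parent hinv hi hhi, if_pos hrhi]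
  have hinv' : PInv (parent.set hi lo) := by
    intro k hk
    rw [List.length_set] at hk
    by_cases hkh : k = hi
    · subst hkh; rw [getD_set_self _ _ _ hhi]; exact ⟨hlo0, hlohi⟩
    · rw [getD_set_ne _ _ _ _ hkh]; exact hinv k hk
  refine ⟨hinv', ?_⟩
  intro k
  induction k using Nat.strong_induction_on with
  | _ k ih =>
    intro hk
    rw [root_step _ hinv' k (by simpa using hk)]
    by_cases hkh : k = hi
    · rw [hkh, getD_set_self _ _ _ hhi]
      by_cases hloeq : lo = (hi : Int)
      · rw [if_pos hloeq, hRhi, if_pos rfl]; exact hloeq.symm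
      · have hlth : lo.toNat < hi := by omega
        have hRlo : Root parent lo.toNat = lo := root_fix parent hinv lo hlo0 (by omega) hrlo
        rw [if_neg hloeq, ih lo.toNat (by omega) (by omega), hRlo, if_neg hloeq, hRhi, if_pos rfl]
    · rw [getD_set_ne _ _ _ _ hkh]
      by_cases hp : parent.getD k 0 = (k : Int)
      · have hRk : Root parent k = (k : Int) := by
          rw [root_step parent hinv k hk, if_pos hp]
        have hne : ((k : Int) : Int) ≠ (hi : Int) := by
          intro h; exact hkh (by exact_mod_cast h)
        rw [if_pos hp, hRk, if_neg hne]
      · have hb := hinv k hk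
        have hlt : (parent.getD k 0).toNat < k := by omega
        have hRk : Root parent k = Root parent (parent.getD k 0).toNat := by
          rw [root_step parent hinv k hk, if_neg hp]
        rw [if_neg hp, ih _ hlt (by omega), hRk]

-- path compression: setting slot s to its own root changes no root
theorem root_compress (parent : List Int) (hinv : PInv parent) (s : Nat) (hs : s < parent.length) :
    PInv (parent.set s (Root parent s)) ∧
    ∀ k, k < parent.length → Root (parent.set s (Root parent s)) k = Root parent k := by
  have hr := root_spec parent hinv s hs
  have hinv' : PInv (parent.set s (Root parent s)) := by
    intro k hk
    rw [List.length_set] at hk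
    by_cases hks : k = s
    · subst hks; rw [getD_set_self _ _ _ hs]; exact ⟨hr.1, hr.2.1⟩
    · rw [getD_set_ne _ _ _ _ hks]; exact hinv k hk
  refine ⟨hinv', ?_⟩
  intro k
  induction k using Nat.strong_induction_on with
  | _ k ih =>
    intro hk
    rw [root_step _ hinv' k (by simpa using hk)]
    by_cases hks : k = s
    · rw [hks, getD_set_self _ _ _ hs]
      by_cases hres : Root parent s = (s : Int)
      · rw [if_pos hres]; exact hres.symm
      · have hlt : (Root parent s).toNat < s := by omega
        rw [if_neg hres, ih _ (by omega) (by omega)]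
        exact root_fix parent hinv _ hr.1 (by omega) hr.2.2
    · rw [getD_set_ne _ _ _ _ hks]
      by_cases hp : parent.getD k 0 = (k : Int)
      · have hRk : Root parent k = (k : Int) := by
          rw [root_step parent hinv k hk, if_pos hp]
        rw [if_pos hp, hRk]
      · have hb := hinv k hk
        have hlt : (parent.getD k 0).toNat < k := by omega
        have hRk : Root parent k = Root parent (parent.getD k 0).toNat := by
          rw [root_step parent hinv k hk, if_neg hp]
        rw [if_neg hp, ih _ hlt (by omega), hRk]

theorem slot_natCast (L k : Nat) : slot L ((k : Nat) : Int) = k := by simp [slot]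

theorem findA_spec_nat (parent : List Int) (hinv : PInv parent) :
    ∀ k f, k < parent.length → k+1 ≤ f →
      (findA f parent (k : Int)).2 = Root parent k ∧
      (findA f parent (k : Int)).1.length = parent.length ∧
      PInv (findA f parent (k : Int)).1 ∧
      ∀ j, j < parent.length → Root (findA f parent (k : Int)).1 j = Root parent j := by
  intro k
  induction k using Nat.strong_induction_on with
  | _ k ih =>
    intro f hk hf
    obtain ⟨f', rfl⟩ : ∃ f', f = f'+1 := ⟨f-1, by omega⟩
    have hget : PySem.List.pyGetD parent ((k : Nat) : Int) 0 = parent.getD k 0 := by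
      rw [pyGetD_slot parent _ _ (by omega) (by exact_mod_cast hk), slot_natCast]
    simp only [findA, hget]
    by_cases hp : parent.getD k 0 = (k : Int)
    · rw [if_neg (by simp [show parent[k]?.getD 0 = ((k : Nat) : Int) from hp])]
      refine ⟨?_, rfl, hinv, fun j _ => rfl⟩
      rw [hp, root_step parent hinv k hk, if_pos hp]
    · have hb := hinv k hk
      have hlt : (parent.getD k 0).toNat < k := by omega
      rw [if_pos (by simp [show parent[k]?.getD 0 ≠ ((k : Nat) : Int) from hp])]
      have spec := ih (parent.getD k 0).toNat hlt f' (by omega) (by omega)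
      rw [show (((parent.getD k 0).toNat : Nat) : Int) = parent.getD k 0 by omega] at spec
      obtain ⟨h2, hlen, hinvp, hpres⟩ := spec
      have hRk : Root parent k = Root parent (parent.getD k 0).toNat := by
        rw [root_step parent hinv k hk, if_neg hp]
      have hset : PySem.List.pySetD (findA f' parent (parent.getD k 0)).1 ((k : Nat) : Int)
          (findA f' parent (parent.getD k 0)).2 = (findA f' parent (parent.getD k 0)).1.set k
          (findA f' parent (parent.getD k 0)).2 := by
        rw [pySetD_slot _ _ _ (by omega) (by rw [hlen]; exact_mod_cast hk), hlen, slot_natCast]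
      rw [hset]
      have hr2 : (findA f' parent (parent.getD k 0)).2 =
          Root (findA f' parent (parent.getD k 0)).1 k := by
        rw [h2, ← hRk, ← hpres k hk]
      have hcomp := root_compress (findA f' parent (parent.getD k 0)).1 hinvp k
        (by rw [hlen]; exact hk)
      rw [hr2]
      refine ⟨by rw [← hr2, h2, hRk], by rw [List.length_set]; exact hlen, hcomp.1, fun j hj => ?_⟩
      exact (hcomp.2 j (by rw [hlen]; exact hj)).trans (hpres j hj)

theorem findA_spec (parent : List Int) (hinv : PInv parent) (x : Int)
    (hx1 : -(parent.length : Int) ≤ x) (hx2 : x < (parent.length : Int)) :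
    (findA (parent.length + 1) parent x).2 = Root parent (slot parent.length x) ∧
    (findA (parent.length + 1) parent x).1.length = parent.length ∧
    PInv (findA (parent.length + 1) parent x).1 ∧
    ∀ j, j < parent.length →
      Root (findA (parent.length + 1) parent x).1 j = Root parent j := by
  by_cases h0 : 0 ≤ x
  · rw [show x = ((x.toNat : Nat) : Int) by omega, slot_natCast]
    exact findA_spec_nat parent hinv x.toNat _ (by omega) (by omega)
  · rw [not_le] at h0
    have he : slot parent.length x < parent.length := slot_lt _ _ hx1 hx2
    have hget : PySem.List.pyGetD parent x 0 = parent.getD (slot parent.length x) 0 :=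
      pyGetD_slot parent x 0 hx1 hx2
    have hb := hinv _ he
    have hpx : PySem.List.pyGetD parent x 0 ≠ x := by rw [hget]; omega
    simp only [findA, hget]
    rw [if_pos (by rw [← hget]; exact hpx)]
    have spec := findA_spec_nat parent hinv (parent.getD (slot parent.length x) 0).toNat
      parent.length (by omega) (by omega)
    rw [show (((parent.getD (slot parent.length x) 0).toNat : Nat) : Int) =
        parent.getD (slot parent.length x) 0 by omega] at spec
    obtain ⟨h2, hlen, hinvp, hpres⟩ := spec
    have hRe : Root parent (slot parent.length x) =
        Root parent (parent.getD (slot parent.length x) 0).toNat := by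
      rw [root_step parent hinv _ he]
      by_cases hpe : parent.getD (slot parent.length x) 0 = ((slot parent.length x : Nat) : Int)
      · rw [if_pos hpe, hpe]
        have hfix := root_fix parent hinv ((slot parent.length x : Nat) : Int) (by positivity)
          (by simpa using he) (by simpa using hpe)
        simp only [Int.toNat_natCast] at hfix ⊢
        exact hfix.symm
      · rw [if_neg hpe]
    have hset : PySem.List.pySetD (findA parent.length parent (parent.getD (slot parent.length x) 0)).1 x
        (findA parent.length parent (parent.getD (slot parent.length x) 0)).2 =
        (findA parent.length parent (parent.getD (slot parent.length x) 0)).1.set (slot parent.length x)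
        (findA parent.length parent (parent.getD (slot parent.length x) 0)).2 := by
      rw [pySetD_slot _ _ _ (by rw [hlen]; exact hx1) (by rw [hlen]; exact hx2), hlen]
    rw [hset]
    have hr2 : (findA parent.length parent (parent.getD (slot parent.length x) 0)).2 =
        Root (findA parent.length parent (parent.getD (slot parent.length x) 0)).1
          (slot parent.length x) := by
      rw [h2, ← hRe, ← hpres _ he]
    have hcomp := root_compress (findA parent.length parent (parent.getD (slot parent.length x) 0)).1
      hinvp (slot parent.length x) (by rw [hlen]; exact he)
    rw [hr2]
    refine ⟨by rw [← hr2, h2, hRe], by rw [List.length_set]; exact hlen, hcomp.1, fun j hj => ?_⟩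
    exact (hcomp.2 j (by rw [hlen]; exact hj)).trans (hpres j hj)

theorem unionA_spec (parent : List Int) (hinv : PInv parent) (a b : Int)
    (ha0 : 0 ≤ a) (ha : a < (parent.length : Int)) (hb0 : 0 ≤ b) (hb : b < (parent.length : Int)) :
    PInv (unionA parent a b) ∧ (unionA parent a b).length = parent.length ∧
    ∀ k, k < parent.length →
      Root (unionA parent a b) k =
        (if Root parent a.toNat < Root parent b.toNat then
          (if Root parent k = Root parent b.toNat then Root parent a.toNat else Root parent k)
         else
          (if Root parent k = Root parent a.toNat then Root parent b.toNat else Root parent k)) := by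
  have haN : a.toNat < parent.length := by omega
  have hbN : b.toNat < parent.length := by omega
  have hra := root_spec parent hinv a.toNat haN
  have hrb := root_spec parent hinv b.toNat hbN
  simp only [unionA]
  set fa := findA (parent.length + 1) parent a with hfa
  obtain ⟨ha2, hlenA, hinvA, hpresA⟩ := findA_spec parent hinv a (by omega) ha
  rw [show slot parent.length a = a.toNat from by simp [slot, ha0]] at ha2
  set fb := findA (fa.1.length + 1) fa.1 b with hfb
  obtain ⟨hb2, hlenB, hinvB, hpresB⟩ := findA_spec fa.1 hinvA b
    (by rw [hlenA]; omega) (by rw [hlenA]; exact hb)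
  rw [show slot fa.1.length b = b.toNat from by simp [slot, hb0]] at hb2
  have hlenB' : fb.1.length = parent.length := hlenB.trans hlenA
  have hpres : ∀ j, j < parent.length → Root fb.1 j = Root parent j := fun j hj =>
    (hpresB j (by rw [hlenA]; exact hj)).trans (hpresA j hj)
  have hA : fa.2 = Root parent a.toNat := ha2
  have hB : fb.2 = Root parent b.toNat := hb2.trans (hpresA b.toNat hbN)
  have hfixA : fb.1.getD (Root parent a.toNat).toNat 0 = Root parent a.toNat := by
    have h := (root_spec fb.1 hinvB a.toNat (by rw [hlenB']; exact haN)).2.2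
    rwa [hpres a.toNat haN] at h
  have hfixB : fb.1.getD (Root parent b.toNat).toNat 0 = Root parent b.toNat := by
    have h := (root_spec fb.1 hinvB b.toNat (by rw [hlenB']; exact hbN)).2.2
    rwa [hpres b.toNat hbN] at h
  rw [hA, hB]
  by_cases hcmp : Root parent a.toNat < Root parent b.toNat
  · rw [if_pos hcmp,
      pySetD_slot fb.1 _ _ (by rw [hlenB']; omega) (by rw [hlenB']; omega),
      show slot fb.1.length (Root parent b.toNat) = (Root parent b.toNat).toNat from by
        simp [slot, hrb.1]]
    have hmerge := root_merge fb.1 hinvB (Root parent b.toNat).toNat (Root parent a.toNat)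
      (by rw [hlenB']; omega)
      (by rw [Int.toNat_of_nonneg hrb.1]; exact hfixB)
      hra.1 (by rw [Int.toNat_of_nonneg hrb.1]; omega) hfixA
    refine ⟨hmerge.1, by rw [List.length_set]; exact hlenB', fun k hk => ?_⟩
    rw [if_pos hcmp, hmerge.2 k (by rw [hlenB']; exact hk), hpres k hk,
      Int.toNat_of_nonneg hrb.1]
  · rw [if_neg hcmp,
      pySetD_slot fb.1 _ _ (by rw [hlenB']; omega) (by rw [hlenB']; omega),
      show slot fb.1.length (Root parent a.toNat) = (Root parent a.toNat).toNat from by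
        simp [slot, hra.1]]
    have hmerge := root_merge fb.1 hinvB (Root parent a.toNat).toNat (Root parent b.toNat)
      (by rw [hlenB']; omega)
      (by rw [Int.toNat_of_nonneg hra.1]; exact hfixA)
      hrb.1 (by rw [Int.toNat_of_nonneg hra.1]; omega) hfixB
    refine ⟨hmerge.1, by rw [List.length_set]; exact hlenB', fun k hk => ?_⟩
    rw [if_neg hcmp, hmerge.2 k (by rw [hlenB']; exact hk), hpres k hk,
      Int.toNat_of_nonneg hra.1]

theorem getD_map_lt (l : List Int) (f : Int → Int) (k : Nat) (h : k < l.length) :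
    (l.map f).getD k 0 = f (l.getD k 0) := by
  rw [List.getD_eq_getElem _ _ (by simpa using h), List.getD_eq_getElem _ _ h]
  simp

-- simulation invariant: B's label array comp records exactly A's roots
def SimInv (n : Nat) (parent comp : List Int) : Prop :=
  parent.length = n+1 ∧ comp.length = n+1 ∧ PInv parent ∧
  ∀ k, k < n+1 → comp.getD k 0 = Root parent k

theorem foldl_rel {α β γ : Type} (R : α → β → Prop) (fA : α → γ → α) (fB : β → γ → β) :
    ∀ (l : List γ) (a : α) (b : β),
      (∀ x ∈ l, ∀ a b, R a b → R (fA a x) (fB b x)) → R a b →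
      R (l.foldl fA a) (l.foldl fB b) := by
  intro l
  induction l with
  | nil => intro a b _ h; exact h
  | cons x t ih =>
    intro a b hstep h
    exact ih _ _ (fun y hy => hstep y (List.mem_cons_of_mem _ hy)) (hstep x (List.mem_cons_self) a b h)

theorem edge_step (graph : List (List Int)) (n : Nat) (hn : n = graph.length) (i j : Int)
    (hi0 : 0 ≤ i) (hi : i < (n : Int)) (hj0 : 0 ≤ j) (hj : j < (n : Int)) :
    ∀ parent comp, SimInv n parent comp → SimInv n (edgeA graph parent i j) (edgeB graph comp i j) := by
  intro parent comp hS
  obtain ⟨hplen, hclen, hinv, hsim⟩ := hS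
  by_cases hg : PySem.List.pyGetD (PySem.List.pyGetD graph i []) j 0 = 1
  case neg =>
    simp only [edgeA, edgeB, if_neg hg]
    exact ⟨hplen, hclen, hinv, hsim⟩
  case pos =>
    have hiN : (i+1).toNat < n+1 := by omega
    have hjN : (j+1).toNat < n+1 := by omega
    have hca : PySem.List.pyGetD comp (i+1) 0 = Root parent (i+1).toNat := by
      rw [pyGetD_slot comp _ _ (by omega) (by omega),
        show slot comp.length (i+1) = (i+1).toNat from by
          simp [slot, show (0:Int) ≤ i + 1 by omega]]
      exact hsim _ hiN
    have hcb : PySem.List.pyGetD comp (j+1) 0 = Root parent (j+1).toNat := by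
      rw [pyGetD_slot comp _ _ (by omega) (by omega),
        show slot comp.length (j+1) = (j+1).toNat from by
          simp [slot, show (0:Int) ≤ j + 1 by omega]]
      exact hsim _ hjN
    have hu := unionA_spec parent hinv (i+1) (j+1) (by omega) (by omega) (by omega) (by omega)
    simp only [edgeA, edgeB, if_pos hg, hca, hcb]
    refine ⟨hu.2.1.trans hplen, ?_, hu.1, ?_⟩
    · by_cases heq : Root parent (i+1).toNat = Root parent (j+1).toNat
      · simp [heq, hclen]
      · simp [heq, hclen]
    · intro k hk
      have hku := hu.2.2 k (by omega)
      by_cases heq : Root parent (i+1).toNat = Root parent (j+1).toNat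
      · rw [if_neg (by simpa using heq)]
        rw [hku]
        rw [hsim k hk]
        split_ifs with h1 h2 <;> omega
      · rw [if_pos (by simpa using heq)]
        rw [hku, getD_map_lt comp _ k (by omega), hsim k hk]
        by_cases hcmp : Root parent (i+1).toNat < Root parent (j+1).toNat
        · rw [if_pos hcmp, if_pos hcmp, if_pos hcmp]
        · rw [if_neg hcmp, if_neg hcmp, if_neg hcmp]

theorem init_fold (L : Nat) : ∀ (N : Nat) (init : List Int), init.length = L → N < L →
    ((PySem.List.pyRange 1 ((N : Int) + 1) 1).foldl
        (fun p i => PySem.List.pySetD p i i) init).length = L ∧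
    ∀ k, k < L →
      ((PySem.List.pyRange 1 ((N : Int) + 1) 1).foldl
        (fun p i => PySem.List.pySetD p i i) init).getD k 0 =
      if 1 ≤ k ∧ k ≤ N then (k : Int) else init.getD k 0 := by
  intro N
  induction N with
  | zero =>
    intro init hlen hN
    rw [show ((0 : Nat) : Int) + 1 = 1 by norm_num, PySem.List.pyRange_one_eq_nil (by omega)]
    simp only [List.foldl_nil]
    exact ⟨hlen, fun k hk => by rw [if_neg (by omega)]⟩
  | succ N ihN =>
    intro init hlen hN
    obtain ⟨hl, he⟩ := ihN init hlen (by omega)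
    rw [show ((N+1 : Nat) : Int) + 1 = ((N : Int) + 1) + 1 by push_cast; ring,
      PySem.List.pyRange_one_succ_right (by omega), List.foldl_append]
    simp only [List.foldl_cons, List.foldl_nil]
    have hset : PySem.List.pySetD
        ((PySem.List.pyRange 1 ((N : Int) + 1) 1).foldl (fun p i => PySem.List.pySetD p i i) init)
        ((N : Int)+1) ((N : Int)+1) =
        ((PySem.List.pyRange 1 ((N : Int) + 1) 1).foldl
          (fun p i => PySem.List.pySetD p i i) init).set (N+1) ((N : Int)+1) := by
      rw [pySetD_slot _ _ _ (by omega) (by omega),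
        show slot ((PySem.List.pyRange 1 ((N : Int) + 1) 1).foldl
          (fun p i => PySem.List.pySetD p i i) init).length ((N : Int)+1) = N+1 from by
            simp [slot, show (0:Int) ≤ (N : Int) + 1 by omega]]
    rw [hset]
    refine ⟨by rw [List.length_set]; exact hl, fun k hk => ?_⟩
    by_cases hkN : k = N+1
    · rw [hkN, getD_set_self _ _ _ (by omega), if_pos (by omega)]
      push_cast
      ring
    · rw [getD_set_ne _ _ _ _ hkN, he k hk]
      by_cases h1 : 1 ≤ k ∧ k ≤ N
      · rw [if_pos h1, if_pos (by omega)]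
      · rw [if_neg h1, if_neg (by omega)]

theorem init_sim (graph : List (List Int)) :
    SimInv graph.length
      ((PySem.List.pyRange 1 ((graph.length : Int) + 1) 1).foldl
        (fun p i => PySem.List.pySetD p i i) (List.replicate (graph.length + 1) 0))
      (PySem.List.pyRange 0 ((graph.length : Int) + 1) 1) := by
  obtain ⟨hl, he⟩ := init_fold (graph.length+1) graph.length
    (List.replicate (graph.length+1) 0) (by simp) (by omega)
  have hent : ∀ k, k < graph.length+1 →
      ((PySem.List.pyRange 1 ((graph.length : Int) + 1) 1).foldl
        (fun p i => PySem.List.pySetD p i i) (List.replicate (graph.length + 1) 0)).getD k 0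
        = (k : Int) := by
    intro k hk
    rw [he k hk]
    split_ifs with h
    · rfl
    · have hk0 : k = 0 := by omega
      subst hk0
      simp
  have hinv1 : PInv ((PySem.List.pyRange 1 ((graph.length : Int) + 1) 1).foldl
      (fun p i => PySem.List.pySetD p i i) (List.replicate (graph.length + 1) 0)) := by
    intro k hk
    rw [hl] at hk
    rw [hent k hk]
    omega
  have hroot1 : ∀ k, k < graph.length+1 →
      Root ((PySem.List.pyRange 1 ((graph.length : Int) + 1) 1).foldl
        (fun p i => PySem.List.pySetD p i i) (List.replicate (graph.length + 1) 0)) k = (k : Int) := by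
    intro k hk
    rw [root_step _ hinv1 k (by rw [hl]; exact hk), if_pos (hent k hk)]
  have hclen : (PySem.List.pyRange 0 ((graph.length : Int) + 1) 1).length = graph.length+1 := by
    rw [PySem.List.length_pyRange_one]
    omega
  refine ⟨hl, hclen, hinv1, fun k hk => ?_⟩
  rw [List.getD_eq_getElem _ _ (by rw [hclen]; exact hk), PySem.List.getElem_pyRange_one,
    hroot1 k hk]
  omega

theorem final_loop (n : Nat) (path comp : List Int) (hclen : comp.length = n+1)
    (hvalid : ∀ p ∈ path, -((n : Int) + 1) ≤ p ∧ p ≤ (n : Int)) :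
    ∀ (l : List Int), (∀ i ∈ l, 0 ≤ i ∧ i + 1 < (path.length : Int)) →
    ∀ parent res, parent.length = n+1 → PInv parent →
      (∀ k, k < n+1 → comp.getD k 0 = Root parent k) →
      (l.foldl (stepFin path) (parent, res)).2 =
        (res && l.all (fun i =>
          decide (PySem.List.pyGetD comp (PySem.List.pyGetD path i 0) 0 =
                  PySem.List.pyGetD comp (PySem.List.pyGetD path (i+1) 0) 0))) := by
  intro l
  induction l with
  | nil => intro _ parent res _ _ _; simp
  | cons i t ih =>
    intro hmem parent res hplen hinv hsim
    obtain ⟨hi0, hi1⟩ := hmem i List.mem_cons_self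
    have hx1mem : PySem.List.pyGetD path i 0 ∈ path :=
      PySem.List.pyGetD_mem path 0 (⟨by omega, by omega⟩ : PySem.Raise.InRange path.length i)
    have hx2mem : PySem.List.pyGetD path (i+1) 0 ∈ path :=
      PySem.List.pyGetD_mem path 0 (⟨by omega, by omega⟩ : PySem.Raise.InRange path.length (i+1))
    obtain ⟨hv11, hv12⟩ := hvalid _ hx1mem
    obtain ⟨hv21, hv22⟩ := hvalid _ hx2mem
    simp only [List.foldl_cons, List.all_cons, stepFin]
    obtain ⟨h12, h1len, h1inv, h1pres⟩ :=
      findA_spec parent hinv (PySem.List.pyGetD path i 0) (by omega) (by omega)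
    obtain ⟨h22, h2len, h2inv, h2pres⟩ :=
      findA_spec (findA (parent.length + 1) parent (PySem.List.pyGetD path i 0)).1 h1inv
        (PySem.List.pyGetD path (i+1) 0) (by rw [h1len]; omega) (by rw [h1len]; omega)
    have hs1 : slot parent.length (PySem.List.pyGetD path i 0) < n+1 := by
      have := slot_lt parent.length _ (by omega : -(parent.length : Int) ≤ PySem.List.pyGetD path i 0) (by omega)
      omega
    have hs2 : slot parent.length (PySem.List.pyGetD path (i+1) 0) < n+1 := by
      have := slot_lt parent.length _ (by omega : -(parent.length : Int) ≤ PySem.List.pyGetD path (i+1) 0) (by omega)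
      omega
    have hsl2 : slot (findA (parent.length + 1) parent (PySem.List.pyGetD path i 0)).1.length
        (PySem.List.pyGetD path (i+1) 0) =
        slot parent.length (PySem.List.pyGetD path (i+1) 0) := by rw [h1len]
    have hc1 : PySem.List.pyGetD comp (PySem.List.pyGetD path i 0) 0 =
        Root parent (slot parent.length (PySem.List.pyGetD path i 0)) := by
      rw [pyGetD_slot comp _ _ (by omega) (by omega),
        show slot comp.length (PySem.List.pyGetD path i 0)
           = slot parent.length (PySem.List.pyGetD path i 0) from by rw [hclen, hplen]]
      exact hsim _ hs1
    have hc2 : PySem.List.pyGetD comp (PySem.List.pyGetD path (i+1) 0) 0 =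
        Root parent (slot parent.length (PySem.List.pyGetD path (i+1) 0)) := by
      rw [pyGetD_slot comp _ _ (by omega) (by omega),
        show slot comp.length (PySem.List.pyGetD path (i+1) 0)
           = slot parent.length (PySem.List.pyGetD path (i+1) 0) from by rw [hclen, hplen]]
      exact hsim _ hs2
    have h22' : (findA ((findA (parent.length + 1) parent (PySem.List.pyGetD path i 0)).1.length + 1)
        (findA (parent.length + 1) parent (PySem.List.pyGetD path i 0)).1
        (PySem.List.pyGetD path (i+1) 0)).2 =
        Root parent (slot parent.length (PySem.List.pyGetD path (i+1) 0)) := by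
      rw [h22, hsl2, h1pres _ (by omega)]
    have hbool : (if (findA (parent.length + 1) parent (PySem.List.pyGetD path i 0)).2 ≠
          (findA ((findA (parent.length + 1) parent (PySem.List.pyGetD path i 0)).1.length + 1)
            (findA (parent.length + 1) parent (PySem.List.pyGetD path i 0)).1
            (PySem.List.pyGetD path (i+1) 0)).2 then false else res) =
        (res && decide (PySem.List.pyGetD comp (PySem.List.pyGetD path i 0) 0 =
                PySem.List.pyGetD comp (PySem.List.pyGetD path (i+1) 0) 0)) := by
      rw [h12, h22', hc1, hc2]
      by_cases h : Root parent (slot parent.length (PySem.List.pyGetD path i 0)) =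
          Root parent (slot parent.length (PySem.List.pyGetD path (i+1) 0))
      · simp [h]
      · simp [h]
    rw [hbool]
    rw [ih (fun y hy => hmem y (List.mem_cons_of_mem _ hy)) _ _
      (h2len.trans (h1len.trans hplen)) h2inv
      (fun k hk => (hsim k hk).trans
        (((h2pres k (by omega)).trans (h1pres k (by omega))).symm))]
    rw [Bool.and_assoc]

-- ===== VERDICT (by name: the statement is the Claim_ definition above) =====
theorem solution_spec : Claim_equal_solution := by
  intro graph path _ hpre
  unfold Spec_solution
  obtain ⟨hrows, hpath⟩ := hpre
  simp only [solution, solution_alt, PySem.List.len_eq]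
  have hbase := init_sim graph
  have hedges := foldl_rel (SimInv graph.length)
      (fun p i => (PySem.List.pyRange 0 (graph.length : Int) 1).foldl
        (fun p j => edgeA graph p i j) p)
      (fun c i => (PySem.List.pyRange 0 (graph.length : Int) 1).foldl
        (fun c j => edgeB graph c i j) c)
      (PySem.List.pyRange 0 (graph.length : Int) 1) _ _
      (fun x hx p c h => by
        have hxb := (PySem.List.mem_pyRange_one).1 hx
        exact foldl_rel (SimInv graph.length) _ _ _ p c
          (fun y hy p' c' h' => by
            have hyb := (PySem.List.mem_pyRange_one).1 hy
            exact edge_step graph graph.length rfl x y hxb.1 hxb.2 hyb.1 hyb.2 p' c' h') h)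
      hbase
  obtain ⟨hplen, hclen, hinvp, hsim⟩ := hedges
  by_cases hm : 2 ≤ path.length
  · rw [final_loop graph.length path _ hclen (hpath hm) _
      (fun i hi => by
        have hib := (PySem.List.mem_pyRange_one).1 hi
        exact ⟨hib.1, by omega⟩)
      _ true hplen hinvp hsim]
    rw [Bool.true_and]
    rfl
  · rw [show PySem.List.pyRange 0 ((path.length : Int) - 1) 1 = [] from
      PySem.List.pyRange_one_eq_nil (by omega)]
    simp
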